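-- pv_equiv track=rewrite | github.com/omkar211/DailyWork | Day6-Bit_Manipulation/find_two_numbers.py | two_numbers
-- ===== SOURCE A (Python) =====
-- def two_numbers(A,k):
--     dt=dict()
--     for i in range(len(A)):
--         if (A[i]^k) in dt:#dt.get(A[i]^k,"message")
--             return 'exist'
--         else:
--             dt[A[i]]=i
--     return"not exist"
-- ===== SOURCE B (Python) =====
-- def two_numbers(A, k):
--     for i in range(len(A)):
--         for j in range(i):
--             if A[i] ^ A[j] == k:
--                 return 'exist'
--     return "not exist"
-- ===== Notes on version B (the rewrite author's own statement) =====
-- stated objective: simpler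
-- what changed: Replaced the dict-based single pass with a direct brute-force scan over all unordered pairs of distinct indices, maintaining no auxiliary structure.
import Mathlib
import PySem

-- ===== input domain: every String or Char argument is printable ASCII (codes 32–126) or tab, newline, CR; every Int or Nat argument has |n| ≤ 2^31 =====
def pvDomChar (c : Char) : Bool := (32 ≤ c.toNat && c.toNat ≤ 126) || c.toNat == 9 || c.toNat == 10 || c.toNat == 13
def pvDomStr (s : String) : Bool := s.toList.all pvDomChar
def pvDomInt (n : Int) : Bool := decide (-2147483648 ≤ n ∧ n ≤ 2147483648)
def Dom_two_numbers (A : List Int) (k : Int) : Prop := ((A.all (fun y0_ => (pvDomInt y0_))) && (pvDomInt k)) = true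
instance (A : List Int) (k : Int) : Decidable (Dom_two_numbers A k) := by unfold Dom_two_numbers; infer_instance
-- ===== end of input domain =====

-- B replaces A's dict-backed single pass by a plain brute-force scan over all pairs of
-- distinct indices (objective: simpler — no auxiliary structure; quadratic instead of linear).

-- ===== PORT A =====
-- loop body of A: iterate i over range(len(A)) carrying the dict dt;
-- A[i] is carried as the pair (a, i) from enumerate-style indexing (i always in range)
def twoA_go (k : Int) : List (Int × Nat) → PySem.Dict Int Int → String
  | [], _ => "not exist"
  | (a, i) :: rest, dt =>
    if dt.contains (PySem.Int.bxor a k) then "exist"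
    else twoA_go k rest (dt.insert a (Int.ofNat i))

def two_numbers (A : List Int) (k : Int) : String :=
  twoA_go k A.zipIdx PySem.Dict.empty

-- ===== PORT B =====
-- inner loop of B: for j in range(i), test A[i] ^ A[j] == k over the prefix already seen
def twoB_inner (ai k : Int) : List Int → Bool
  | [] => false
  | a :: rest => if PySem.Int.bxor ai a = k then true else twoB_inner ai k rest

-- outer loop of B: walk the list, carrying the prefix of elements with smaller index
def twoB_go (k : Int) : List Int → List Int → String
  | [], _ => "not exist"
  | a :: rest, seen =>
    if twoB_inner a k seen then "exist" else twoB_go k rest (seen ++ [a])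

def two_numbers_alt (A : List Int) (k : Int) : String :=
  twoB_go k A []

-- ===== PRECONDITION & SPEC =====
def Spec_two_numbers (A : List Int) (k : Int) (out : String) : Prop := out = two_numbers_alt A k
instance (A : List Int) (k : Int) (out : String) : Decidable (Spec_two_numbers A k out) := by unfold Spec_two_numbers; infer_instance

-- ===== CLAIM (what is proved, stated in full; the proofs are below) =====
def Claim_equal_two_numbers : Prop := ∀ (A : List Int) (k : Int), Dom_two_numbers A k → Spec_two_numbers A k (two_numbers A k)

-- ===== LEMMAS AND PROOFS =====

lemma nat_xor_cancel (n m : Nat) : n ^^^ (n ^^^ m) = m := by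
  rw [← Nat.xor_assoc, Nat.xor_self, Nat.zero_xor]

-- xor is self-inverse on Int (Python semantics)
lemma bxor_bxor_cancel (a k : Int) : PySem.Int.bxor a (PySem.Int.bxor a k) = k := by
  unfold PySem.Int.bxor
  by_cases ha : 0 ≤ a <;> by_cases hk : 0 ≤ k
  · simp only [if_pos ha, if_pos hk, if_pos (Int.natCast_nonneg _)]
    rw [Int.toNat_natCast, nat_xor_cancel, Int.toNat_of_nonneg hk]
  · have hnn := Int.natCast_nonneg (a.toNat ^^^ (-k - 1).toNat)
    have hneg : ¬ (0:Int) ≤ -(↑(a.toNat ^^^ (-k - 1).toNat)) - 1 := by omega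
    simp only [if_pos ha, if_neg (hk), if_neg hneg]
    have h2 : (-(-(↑(a.toNat ^^^ (-k - 1).toNat) : Int) - 1) - 1)
        = ((a.toNat ^^^ (-k - 1).toNat : Nat) : Int) := by ring
    rw [h2, Int.toNat_natCast, nat_xor_cancel]
    have h3 : (((-k - 1).toNat : Int)) = -k - 1 := Int.toNat_of_nonneg (by omega)
    omega
  · have hnn := Int.natCast_nonneg ((-a - 1).toNat ^^^ k.toNat)
    have hneg : ¬ (0:Int) ≤ -(↑((-a - 1).toNat ^^^ k.toNat)) - 1 := by omega
    simp only [if_neg (ha), if_pos hk, if_neg hneg]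
    have h2 : (-(-(↑((-a - 1).toNat ^^^ k.toNat) : Int) - 1) - 1)
        = (((-a - 1).toNat ^^^ k.toNat : Nat) : Int) := by ring
    rw [h2, Int.toNat_natCast, nat_xor_cancel, Int.toNat_of_nonneg hk]
  · simp only [if_neg (ha), if_neg (hk),
      if_pos (Int.natCast_nonneg ((-a - 1).toNat ^^^ (-k - 1).toNat))]
    rw [Int.toNat_natCast, nat_xor_cancel]
    have h6 : (((-k - 1).toNat : Int)) = -k - 1 := Int.toNat_of_nonneg (by omega)
    omega

lemma xor_eq_iff (a x k : Int) : (PySem.Int.bxor a x = k) ↔ x = PySem.Int.bxor a k := by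
  constructor
  · intro h; rw [← h, bxor_bxor_cancel]
  · rintro rfl; exact bxor_bxor_cancel a k

-- B's inner loop is membership of a ^ k in the seen prefix
lemma twoB_inner_eq (a k : Int) (seen : List Int) :
    twoB_inner a k seen = decide ((PySem.Int.bxor a k) ∈ seen) := by
  induction seen with
  | nil => simp [twoB_inner]
  | cons x rest ih =>
    simp only [twoB_inner, ih, List.mem_cons]
    by_cases h : PySem.Int.bxor a x = k
    · have : PySem.Int.bxor a k = x := ((xor_eq_iff a x k).mp h).symm
      simp [h, this]
    · have hne : ¬ PySem.Int.bxor a k = x := fun hx => h ((xor_eq_iff a x k).mpr hx.symm)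
      simp [h, hne]

-- main invariant: if the dict's keys are exactly the seen prefix (as a membership test),
-- A's loop and B's loop return the same string
lemma go_eq (k : Int) (l : List (Int × Nat)) (dt : PySem.Dict Int Int) (seen : List Int)
    (h : ∀ x, dt.contains x = decide (x ∈ seen)) :
    twoA_go k l dt = twoB_go k (l.map Prod.fst) seen := by
  induction l generalizing dt seen with
  | nil => simp [twoA_go, twoB_go]
  | cons p rest ih =>
    obtain ⟨a, i⟩ := p
    simp only [twoA_go, List.map_cons, twoB_go, twoB_inner_eq, h (PySem.Int.bxor a k)]
    split
    · rfl
    · apply ih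
      intro x
      rw [PySem.Dict.contains_insert, h x]
      by_cases hxa : x = a <;> simp [hxa, List.mem_append, or_comm]

theorem two_numbers_eq_alt (A : List Int) (k : Int) : two_numbers A k = two_numbers_alt A k := by
  unfold two_numbers two_numbers_alt
  have := go_eq k A.zipIdx PySem.Dict.empty [] (by simp)
  simpa using this

-- ===== VERDICT (by name: the statement is the Claim_ definition above) =====
theorem two_numbers_spec : Claim_equal_two_numbers := by
  intro A k _
  exact two_numbers_eq_alt A k
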